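-- pv_equiv track=rewrite | github.com/AceMouse/peg-solitaire | code/naive.py | dfs
-- ===== SOURCE A (Python) =====
-- def dfs(b, l, ones):
--     m = ones
--     for i in range(l-2):
--         if (b>>i) & 0b111 in [0b011, 0b110]: #check if valid move.
--             b ^= 0b111 << i #perform move.
--             m = min(dfs(b,l, ones-1), m)
--             b ^= 0b111 << i #undo move.
--     return m
-- ===== SOURCE B (Python) =====
-- def dfs(b, l, ones):
--     def succs(c):
--         return [c ^ (7 << i) for i in range(l - 2) if (c >> i) & 7 in (3, 6)]
--     layer = {b}
--     depth = 0
--     while True: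
--         nxt = set()
--         for c in layer:
--             nxt.update(succs(c))
--         if not nxt:
--             return ones - depth
--         layer = nxt
--         depth += 1
-- ===== Notes on version B (the rewrite author's own statement) =====
-- stated objective: alternative
-- what changed: A recursively re-explores every move sequence with backtracking; B does an iterative breadth-first expansion over SETS of board states (each move removes one peg, so layer k holds exactly the boards reachable in k moves), counts the layers until no move exists, and returns ones minus that count.
import Mathlib
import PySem

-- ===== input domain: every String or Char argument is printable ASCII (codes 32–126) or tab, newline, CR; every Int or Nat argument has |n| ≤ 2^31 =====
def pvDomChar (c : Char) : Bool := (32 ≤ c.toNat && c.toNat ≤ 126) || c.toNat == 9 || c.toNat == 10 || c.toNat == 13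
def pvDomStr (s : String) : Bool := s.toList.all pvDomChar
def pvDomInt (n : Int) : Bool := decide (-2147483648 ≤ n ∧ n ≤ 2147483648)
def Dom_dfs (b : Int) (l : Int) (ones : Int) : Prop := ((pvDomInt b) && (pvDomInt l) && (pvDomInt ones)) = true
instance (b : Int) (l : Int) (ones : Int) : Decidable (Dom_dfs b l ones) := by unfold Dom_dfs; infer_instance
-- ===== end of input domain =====

-- B replaces A's recursive re-exploration of move sequences by an iterative breadth-first expansion
-- over sets of board states, counting the layers until no move exists; the return value is identical.

-- Fuel bound shared by both ports (a totality device only, never reached): the recursion/loop depth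
-- is bounded by the number of set bits among the low `l` bits of the board (each move clears one).
def pcAux (b : Int) : Nat → Nat → Nat
  | 0, acc => acc
  | k+1, acc => pcAux b k (acc + if b.testBit k then 1 else 0)

def pcF (b : Int) (l : Int) : Nat := pcAux b l.toNat 0

-- ===== PORT A =====
-- literal transliteration of A's loop: for i in range(l-2), on a valid move recurse on the toggled
-- board (toggle + undo leaves b unchanged across iterations, so the fold state is just m).
def dfsF : Nat → Int → Int → Int → Int
  | 0, _, _, ones => ones  -- fuel guard, never reached (fuel = pcF b l + 1 suffices)
  | f+1, b, l, ones =>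
    (PySem.List.pyRange 0 (l-2) 1).foldl
      (fun m i =>
        if PySem.Int.band (b >>> i) 7 = 3 ∨ PySem.Int.band (b >>> i) 7 = 6 then
          min (dfsF f (PySem.Int.bxor b ((7:Int) <<< i)) l (ones - 1)) m
        else m) ones

def dfs (b : Int) (l : Int) (ones : Int) : Int := dfsF (pcF b l + 1) b l ones

-- ===== PORT B =====
-- B's helper succs(c): the successor boards of c, a list comprehension (filter + map over range).
def succsB (l : Int) (c : Int) : List Int :=
  ((PySem.List.pyRange 0 (l-2) 1).filter
      (fun i => PySem.Int.band (c >>> i) 7 == 3 || PySem.Int.band (c >>> i) 7 == 6)).map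
    (fun i => PySem.Int.bxor c ((7:Int) <<< i))

-- B's while-loop, fuelled: expand the current layer-set into the set of all successor boards;
-- stop (returning the depth) when it is empty.  The final depth is order-independent, so iterating
-- the Set's list is exact even though Python's set iteration order is not modelled.
def bfsF (l : Int) : Nat → PySem.Set Int → Int → Int
  | 0, _, depth => depth  -- fuel guard, never reached
  | f+1, layer, depth =>
    let nxt : PySem.Set Int :=
      layer.foldl (fun s c => PySem.Set.update s (succsB l c)) PySem.Set.empty
    if nxt.isEmpty then depth else bfsF l f nxt (depth + 1)

def dfs_alt (b : Int) (l : Int) (ones : Int) : Int :=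
  ones - bfsF l (pcF b l + 1) (PySem.Set.ofList [b]) 0

-- ===== PRECONDITION & SPEC =====
def Spec_dfs (b : Int) (l : Int) (ones : Int) (out : Int) : Prop := out = dfs_alt b l ones
instance (b : Int) (l : Int) (ones : Int) (out : Int) : Decidable (Spec_dfs b l ones out) := by unfold Spec_dfs; infer_instance

-- ===== CLAIM (what is proved, stated in full; the proofs are below) =====
def Claim_equal_dfs : Prop := ∀ (b : Int) (l : Int) (ones : Int), Dom_dfs b l ones → Spec_dfs b l ones (dfs b l ones)

-- ===== LEMMAS AND PROOFS =====

-- proof-side characterisation of the fuel: number of set bits among the low l bits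
def pcL (b : Int) (l : Int) : Nat := ∑ j ∈ Finset.range l.toNat, (if b.testBit j then 1 else 0)

theorem pcAux_eq (b : Int) : ∀ (n : Nat) (acc : Nat),
    pcAux b n acc = acc + ∑ j ∈ Finset.range n, (if b.testBit j then 1 else 0) := by
  intro n
  induction n with
  | zero => intro acc; simp [pcAux]
  | succ n ih =>
    intro acc
    rw [pcAux, ih, Finset.sum_range_succ]
    omega

theorem pcF_eq (b l : Int) : pcF b l = pcL b l := by
  rw [pcF, pcAux_eq, pcL, Nat.zero_add]

-- proof-only spec function: longest move sequence from board b, plain recursion on fuel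
def maxmF : Nat → Int → Int → Int
  | 0, _, _ => 0
  | f+1, b, l =>
    (PySem.List.pyRange 0 (l-2) 1).foldl
      (fun acc i =>
        if PySem.Int.band (b >>> i) 7 = 3 ∨ PySem.Int.band (b >>> i) 7 = 6 then
          max acc (1 + maxmF f (PySem.Int.bxor b ((7:Int) <<< i)) l)
        else acc) 0

-- mx c = length of the longest move sequence from c (fuel pinned to the popcount)
def mx (l : Int) (c : Int) : Int := maxmF (pcL c l) c l

-- ---- bit toolkit ----

theorem tb_ofNat (m : Nat) (j : Nat) : (Int.ofNat m).testBit j = m.testBit j := rfl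
theorem tb_negSucc (m : Nat) (j : Nat) : (Int.negSucc m).testBit j = !m.testBit j := rfl

theorem bxor_ofNat_ofNat (m k : Nat) :
    PySem.Int.bxor (Int.ofNat m) (Int.ofNat k) = Int.ofNat (m ^^^ k) := by
  simp [PySem.Int.bxor]

theorem bxor_ofNat_negSucc (m k : Nat) :
    PySem.Int.bxor (Int.ofNat m) (Int.negSucc k) = Int.negSucc (m ^^^ k) := by
  simp [PySem.Int.bxor, Int.negSucc_eq]; omega

theorem bxor_negSucc_ofNat (m k : Nat) :
    PySem.Int.bxor (Int.negSucc m) (Int.ofNat k) = Int.negSucc (m ^^^ k) := by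
  simp [PySem.Int.bxor, Int.negSucc_eq]; omega

theorem bxor_negSucc_negSucc (m k : Nat) :
    PySem.Int.bxor (Int.negSucc m) (Int.negSucc k) = Int.ofNat (m ^^^ k) := by
  simp [PySem.Int.bxor, Int.negSucc_eq]; omega

theorem tb_bxor (a c : Int) (j : Nat) :
    (PySem.Int.bxor a c).testBit j = (a.testBit j != c.testBit j) := by
  cases a with
  | ofNat m =>
    cases c with
    | ofNat k =>
      rw [bxor_ofNat_ofNat, tb_ofNat, tb_ofNat, tb_ofNat, Nat.testBit_xor]
    | negSucc k =>
      rw [bxor_ofNat_negSucc, tb_negSucc, tb_ofNat, tb_negSucc, Nat.testBit_xor]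
      cases m.testBit j <;> cases k.testBit j <;> rfl
  | negSucc m =>
    cases c with
    | ofNat k =>
      rw [bxor_negSucc_ofNat, tb_negSucc, tb_negSucc, tb_ofNat, Nat.testBit_xor]
      cases m.testBit j <;> cases k.testBit j <;> rfl
    | negSucc k =>
      rw [bxor_negSucc_negSucc, tb_ofNat, tb_negSucc, tb_negSucc, Nat.testBit_xor]
      cases m.testBit j <;> cases k.testBit j <;> rfl

theorem tb_sl7 (n j : Nat) : ((7:Int) <<< n).testBit j = decide (n ≤ j ∧ j < n + 3) := by
  have h : (7:Int) <<< n = Int.ofNat (7 <<< n) := rfl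
  rw [h, tb_ofNat, Nat.testBit_shiftLeft]
  by_cases hj : n ≤ j
  · have h7 : (7:Nat).testBit (j - n) = decide (j - n < 3) := by
      rcases Nat.lt_or_ge (j - n) 3 with h | h
      · interval_cases (j - n) <;> decide
      · have h2 : (7:Nat) < 2 ^ (j - n) :=
          lt_of_lt_of_le (by norm_num : (7:Nat) < 2 ^ 3) (Nat.pow_le_pow_right (by norm_num) h)
        simp [Nat.testBit_lt_two_pow h2]
        omega
    simp [hj, h7]
    omega
  · simp [hj]

theorem tb_shr (b : Int) (n j : Nat) : (b >>> n).testBit j = b.testBit (n + j) := by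
  cases b with
  | ofNat m =>
    have h : (Int.ofNat m) >>> n = Int.ofNat (m >>> n) := rfl
    rw [h, tb_ofNat, tb_ofNat, Nat.testBit_shiftRight]
  | negSucc m =>
    have h : (Int.negSucc m) >>> n = Int.negSucc (m >>> n) := rfl
    rw [h, tb_negSucc, tb_negSucc, Nat.testBit_shiftRight]

theorem band7 (x : Int) :
    PySem.Int.band x 7 =
      (if x.testBit 0 then 1 else 0) + (if x.testBit 1 then 2 else 0) +
        (if x.testBit 2 then 4 else 0) := by
  cases x with
  | ofNat m =>
    have hb : PySem.Int.band (Int.ofNat m) 7 = Int.ofNat (m &&& 7) := by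
      simp [PySem.Int.band]
    have hmod : m &&& 7 = m % 8 := by
      have := Nat.and_two_pow_sub_one_eq_mod m 3
      norm_num at this
      exact this
    have htb : ∀ j, j < 3 → m.testBit j = (m % 8).testBit j := by
      intro j hj
      have := Nat.testBit_mod_two_pow m 3 j
      norm_num at this
      rw [this, decide_eq_true hj, Bool.true_and]
    rw [hb, hmod, tb_ofNat, tb_ofNat, tb_ofNat, htb 0 (by norm_num), htb 1 (by norm_num),
      htb 2 (by norm_num)]
    have h8 : m % 8 < 8 := Nat.mod_lt _ (by norm_num)
    set r := m % 8 with hr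
    clear_value r
    interval_cases r <;> decide
  | negSucc m =>
    have h1 : ¬ (0:Int) ≤ Int.negSucc m := by simp [Int.negSucc_eq]; omega
    have hb : PySem.Int.band (Int.negSucc m) 7 = Int.ofNat (7 - (7 &&& m)) := by
      simp [PySem.Int.band, Int.negSucc_eq]
      omega
    have hmod : 7 &&& m = m % 8 := by
      rw [Nat.and_comm]
      have := Nat.and_two_pow_sub_one_eq_mod m 3
      norm_num at this
      exact this
    have htb : ∀ j, j < 3 → m.testBit j = (m % 8).testBit j := by
      intro j hj
      have := Nat.testBit_mod_two_pow m 3 j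
      norm_num at this
      rw [this, decide_eq_true hj, Bool.true_and]
    rw [hb, hmod, tb_negSucc, tb_negSucc, tb_negSucc, htb 0 (by norm_num), htb 1 (by norm_num),
      htb 2 (by norm_num)]
    have h8 : m % 8 < 8 := Nat.mod_lt _ (by norm_num)
    set r := m % 8 with hr
    clear_value r
    interval_cases r <;> decide

theorem cond_bits (b : Int) (n : Nat)
    (h : PySem.Int.band (b >>> n) 7 = 3 ∨ PySem.Int.band (b >>> n) 7 = 6) :
    ((b.testBit n = true ∧ b.testBit (n+1) = true ∧ b.testBit (n+2) = false) ∨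
     (b.testBit n = false ∧ b.testBit (n+1) = true ∧ b.testBit (n+2) = true)) := by
  rw [band7 (b >>> n), tb_shr, tb_shr, tb_shr] at h
  rw [Nat.add_zero] at h
  rcases hb0 : b.testBit n <;> rcases hb1 : b.testBit (n+1) <;> rcases hb2 : b.testBit (n+2) <;>
    rw [hb0, hb1, hb2] at h <;> simp at h <;> simp

theorem tb_mv (b : Int) (n j : Nat) :
    (PySem.Int.bxor b ((7:Int) <<< n)).testBit j =
      if n ≤ j ∧ j < n + 3 then !b.testBit j else b.testBit j := by
  rw [tb_bxor, tb_sl7]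
  by_cases hw : n ≤ j ∧ j < n + 3
  · simp [hw]
  · simp [hw]

theorem pc_mv (b l i : Int) (h0 : 0 ≤ i) (h1 : i < l - 2)
    (hc : PySem.Int.band (b >>> i) 7 = 3 ∨ PySem.Int.band (b >>> i) 7 = 6) :
    pcL (PySem.Int.bxor b ((7:Int) <<< i)) l + 1 = pcL b l := by
  obtain ⟨n, rfl⟩ : ∃ n : ℕ, (n:ℤ) = i := ⟨i.toNat, Int.toNat_of_nonneg h0⟩
  obtain ⟨L, rfl⟩ : ∃ L : ℕ, (L:ℤ) = l := ⟨l.toNat, Int.toNat_of_nonneg (by omega)⟩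
  rw [Int.shiftRight_natCast_right] at hc
  rw [Int.shiftLeft_natCast_right]
  have hnl : n + 3 ≤ L := by omega
  have htn : (↑L : ℤ).toNat = L := Int.toNat_natCast L
  have hsub : ({n, n+1, n+2} : Finset ℕ) ⊆ Finset.range L := by
    intro j hj
    simp only [Finset.mem_insert, Finset.mem_singleton] at hj
    simp only [Finset.mem_range]
    omega
  unfold pcL
  rw [htn]
  rw [← Finset.sum_sdiff hsub, ← Finset.sum_sdiff (f := fun j => if b.testBit j then 1 else 0) hsub]
  have hout : ∑ j ∈ Finset.range L \ {n, n+1, n+2},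
      (if (PySem.Int.bxor b ((7:Int) <<< n)).testBit j then 1 else 0)
      = ∑ j ∈ Finset.range L \ {n, n+1, n+2}, (if b.testBit j then 1 else 0) := by
    apply Finset.sum_congr rfl
    intro j hj
    simp only [Finset.mem_sdiff, Finset.mem_range, Finset.mem_insert, Finset.mem_singleton,
      not_or] at hj
    have hbj : (PySem.Int.bxor b ((7:Int) <<< n)).testBit j = b.testBit j := by
      rw [tb_mv, if_neg (by omega)]
    rw [hbj]
  have hwin : ∀ (c : Int), ∑ j ∈ ({n, n+1, n+2} : Finset ℕ), (if c.testBit j then 1 else 0)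
      = (if c.testBit n then 1 else 0) + (if c.testBit (n+1) then 1 else 0) +
        (if c.testBit (n+2) then 1 else 0) := by
    intro c
    rw [Finset.sum_insert (by simp only [Finset.mem_insert, Finset.mem_singleton]; omega),
      Finset.sum_insert (by simp only [Finset.mem_singleton]; omega), Finset.sum_singleton]
    ring
  rw [hout, hwin, hwin]
  have hbits := cond_bits b n hc
  have e0 : (PySem.Int.bxor b ((7:Int) <<< n)).testBit n = !b.testBit n := by
    rw [tb_mv, if_pos (by omega)]
  have e1 : (PySem.Int.bxor b ((7:Int) <<< n)).testBit (n+1) = !b.testBit (n+1) := by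
    rw [tb_mv, if_pos (by omega)]
  have e2 : (PySem.Int.bxor b ((7:Int) <<< n)).testBit (n+2) = !b.testBit (n+2) := by
    rw [tb_mv, if_pos (by omega)]
  rw [e0, e1, e2]
  rcases hbits with ⟨ha, hb', hc'⟩ | ⟨ha, hb', hc'⟩ <;> rw [ha, hb', hc'] <;> simp

-- ---- generic fold lemmas ----

theorem foldl_id {α β : Type} (is : List β) (step : α → β → α) (a : α)
    (h : ∀ acc, ∀ i ∈ is, step acc i = acc) : is.foldl step a = a := by
  induction is generalizing a with
  | nil => rfl
  | cons i is ih =>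
    rw [List.foldl_cons, h a i (by simp)]
    exact ih a (fun acc i hi => h acc i (List.mem_cons_of_mem _ hi))

theorem foldl_congr_mem' {α β : Type} (is : List β) (f g : α → β → α) (a : α)
    (h : ∀ acc, ∀ i ∈ is, f acc i = g acc i) : is.foldl f a = is.foldl g a := by
  induction is generalizing a with
  | nil => rfl
  | cons i is ih =>
    rw [List.foldl_cons, h a i (by simp)]
    exact ih _ (fun acc i hi => h acc i (List.mem_cons_of_mem _ hi))

theorem foldl_min_max (is : List Int) (p : Int → Prop) [DecidablePred p] (g : Int → Int)
    (ones a : Int) (ha : 0 ≤ a) :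
    is.foldl (fun m i => if p i then min (ones - 1 - g i) m else m) (ones - a)
      = ones - is.foldl (fun acc i => if p i then max acc (1 + g i) else acc) a := by
  induction is generalizing a with
  | nil => simp
  | cons i is ih =>
    simp only [List.foldl_cons]
    by_cases hp : p i
    · simp only [if_pos hp]
      have h1 : min (ones - 1 - g i) (ones - a) = ones - max a (1 + g i) := by omega
      rw [h1, ih _ (le_trans ha (le_max_left _ _))]
    · simp only [if_neg hp]
      exact ih a ha

-- max-fold characterisation: fold of max is the least upper bound of the start and the images
theorem foldl_max_le_iff (g : Int → Int) : ∀ (cs : List Int) (a y : Int),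
    cs.foldl (fun acc c => max acc (g c)) a ≤ y ↔ a ≤ y ∧ ∀ c ∈ cs, g c ≤ y := by
  intro cs
  induction cs with
  | nil => intro a y; simp
  | cons c cs ih =>
    intro a y
    rw [List.foldl_cons, ih]
    constructor
    · rintro ⟨h1, h2⟩
      exact ⟨le_trans (le_max_left _ _) h1,
        fun d hd => by rcases List.mem_cons.mp hd with rfl | hd
                       · exact le_trans (le_max_right _ _) h1
                       · exact h2 d hd⟩
    · rintro ⟨h1, h2⟩
      exact ⟨max_le h1 (h2 c (by simp)), fun d hd => h2 d (List.mem_cons_of_mem _ hd)⟩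

theorem le_foldl_max_init (g : Int → Int) (cs : List Int) (a : Int) :
    a ≤ cs.foldl (fun acc c => max acc (g c)) a :=
  ((foldl_max_le_iff g cs a _).mp le_rfl).1

theorem le_foldl_max_mem (g : Int → Int) (cs : List Int) (a : Int) (c : Int) (hc : c ∈ cs) :
    g c ≤ cs.foldl (fun acc c => max acc (g c)) a :=
  ((foldl_max_le_iff g cs a _).mp le_rfl).2 c hc

theorem le_foldl_if_max_init {β : Type} (p : β → Prop) [DecidablePred p] (g : β → Int) :
    ∀ (is : List β) (a : Int), a ≤ is.foldl (fun acc i => if p i then max acc (g i) else acc) a := by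
  intro is
  induction is with
  | nil => intro a; simp
  | cons i is ih =>
    intro a
    rw [List.foldl_cons]
    by_cases hp : p i
    · rw [if_pos hp]; exact le_trans (le_max_left _ _) (ih _)
    · rw [if_neg hp]; exact ih a

-- ---- A-side bridge ----

theorem dfsF_eq_maxmF : ∀ (f : Nat) (b l ones : Int), dfsF f b l ones = ones - maxmF f b l := by
  intro f
  induction f with
  | zero => intro b l ones; simp [dfsF, maxmF]
  | succ f ih =>
    intro b l ones
    rw [dfsF, maxmF]
    have hstep : (fun (m i : Int) =>
        if PySem.Int.band (b >>> i) 7 = 3 ∨ PySem.Int.band (b >>> i) 7 = 6 then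
          min (dfsF f (PySem.Int.bxor b ((7:Int) <<< i)) l (ones - 1)) m
        else m)
      = (fun (m i : Int) =>
        if PySem.Int.band (b >>> i) 7 = 3 ∨ PySem.Int.band (b >>> i) 7 = 6 then
          min (ones - 1 - maxmF f (PySem.Int.bxor b ((7:Int) <<< i)) l) m
        else m) := by
      funext m i
      rw [ih]
    rw [hstep]
    have h0 : ones = ones - (0:Int) := by ring
    rw [h0]
    have := foldl_min_max (PySem.List.pyRange 0 (l-2) 1)
      (fun i => PySem.Int.band (b >>> i) 7 = 3 ∨ PySem.Int.band (b >>> i) 7 = 6)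
      (fun i => maxmF f (PySem.Int.bxor b ((7:Int) <<< i)) l) ones 0 le_rfl
    simpa using this

-- ---- stability of maxmF in the fuel ----

theorem maxmF_stab : ∀ (f : Nat) (b l : Int), pcL b l ≤ f → maxmF f b l = maxmF (pcL b l) b l := by
  intro f
  induction f using Nat.strong_induction_on with
  | _ f ih =>
    intro b l hf
    cases hpc : pcL b l with
    | zero =>
      cases f with
      | zero => rfl
      | succ f' =>
        rw [maxmF, maxmF]
        apply foldl_id
        intro acc i hi
        rw [if_neg]
        intro hc
        have hmem := (PySem.List.mem_pyRange_one).mp hi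
        have := pc_mv b l i hmem.1 hmem.2 hc
        omega
    | succ p =>
      obtain ⟨f', rfl⟩ : ∃ f', f = f' + 1 := ⟨f - 1, by omega⟩
      rw [maxmF, maxmF]
      apply foldl_congr_mem'
      intro acc i hi
      by_cases hc : PySem.Int.band (b >>> i) 7 = 3 ∨ PySem.Int.band (b >>> i) 7 = 6
      · rw [if_pos hc, if_pos hc]
        have hmem := (PySem.List.mem_pyRange_one).mp hi
        have hpcmv := pc_mv b l i hmem.1 hmem.2 hc
        have h1 : pcL (PySem.Int.bxor b ((7:Int) <<< i)) l = p := by omega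
        rw [ih f' (by omega) _ l (by omega), h1]
      · rw [if_neg hc, if_neg hc]

-- ---- succsB characterisation ----

theorem mem_succsB (l c x : Int) :
    x ∈ succsB l c ↔ ∃ i : Int, 0 ≤ i ∧ i < l - 2 ∧
      (PySem.Int.band (c >>> i) 7 = 3 ∨ PySem.Int.band (c >>> i) 7 = 6) ∧
      x = PySem.Int.bxor c ((7:Int) <<< i) := by
  unfold succsB
  simp only [List.mem_map, List.mem_filter, PySem.List.mem_pyRange_one]
  constructor
  · rintro ⟨i, ⟨⟨h0, h1⟩, hb⟩, rfl⟩
    refine ⟨i, h0, h1, ?_, rfl⟩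
    simpa using hb
  · rintro ⟨i, h0, h1, hc, rfl⟩
    exact ⟨i, ⟨⟨h0, h1⟩, by simpa using hc⟩, rfl⟩

-- a successor has exactly one peg fewer
theorem pc_succsB (l c s : Int) (hs : s ∈ succsB l c) : pcL s l + 1 = pcL c l := by
  obtain ⟨i, h0, h1, hc, rfl⟩ := (mem_succsB l c s).mp hs
  exact pc_mv c l i h0 h1 hc

-- mx as a fold over succsB
theorem mx_fold (l c : Int) (hne : succsB l c ≠ []) :
    mx l c = (succsB l c).foldl (fun acc s => max acc (1 + mx l s)) 0 := by
  obtain ⟨s0, hs0⟩ := List.exists_mem_of_ne_nil _ hne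
  have hpc : pcL c l = pcL s0 l + 1 := (pc_succsB l c s0 hs0).symm
  unfold mx
  rw [hpc, maxmF]
  -- turn the range fold with an if into a fold over the filtered+mapped list succsB
  have key : ∀ (is : List Int), (∀ i ∈ is, 0 ≤ i ∧ i < l - 2) → ∀ (a : Int),
      is.foldl (fun acc i =>
        if PySem.Int.band (c >>> i) 7 = 3 ∨ PySem.Int.band (c >>> i) 7 = 6 then
          max acc (1 + maxmF (pcL s0 l) (PySem.Int.bxor c ((7:Int) <<< i)) l)
        else acc) a
      = (((is.filter (fun i => PySem.Int.band (c >>> i) 7 == 3 ||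
            PySem.Int.band (c >>> i) 7 == 6)).map
          (fun i => PySem.Int.bxor c ((7:Int) <<< i))).foldl
            (fun acc s => max acc (1 + mx l s)) a) := by
    intro is
    induction is with
    | nil => intro _ a; rfl
    | cons i is ihis =>
      intro hbnd a
      have hib := hbnd i (by simp)
      have htl : ∀ i' ∈ is, 0 ≤ i' ∧ i' < l - 2 :=
        fun i' hi' => hbnd i' (List.mem_cons_of_mem _ hi')
      by_cases hc2 : PySem.Int.band (c >>> i) 7 = 3 ∨ PySem.Int.band (c >>> i) 7 = 6
      · have hbool : (PySem.Int.band (c >>> i) 7 == 3 ||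
            PySem.Int.band (c >>> i) 7 == 6) = true := by simpa using hc2
        have hpci : pcL (PySem.Int.bxor c ((7:Int) <<< i)) l = pcL s0 l := by
          have := pc_mv c l i hib.1 hib.2 hc2
          omega
        rw [List.foldl_cons, if_pos hc2]
        simp only [List.filter_cons]
        rw [if_pos hbool, List.map_cons, List.foldl_cons]
        rw [show maxmF (pcL s0 l) (PySem.Int.bxor c ((7:Int) <<< i)) l
            = mx l (PySem.Int.bxor c ((7:Int) <<< i)) from by rw [mx, hpci]]
        exact ihis htl _
      · have hbool : ¬ ((PySem.Int.band (c >>> i) 7 == 3 ||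
            PySem.Int.band (c >>> i) 7 == 6) = true) := by simpa using hc2
        rw [List.foldl_cons, if_neg hc2]
        simp only [List.filter_cons]
        rw [if_neg hbool]
        exact ihis htl a
  exact key (PySem.List.pyRange 0 (l-2) 1)
    (fun i hi => (PySem.List.mem_pyRange_one).mp hi) 0

theorem mx_nonneg (l c : Int) : 0 ≤ mx l c := by
  unfold mx
  cases hpc : pcL c l with
  | zero => simp [maxmF]
  | succ p => rw [maxmF]; exact le_foldl_if_max_init _ _ _ 0

theorem mx_of_no_succs (l c : Int) (h : succsB l c = []) : mx l c = 0 := by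
  unfold mx
  cases hpc : pcL c l with
  | zero => simp [maxmF]
  | succ p =>
    rw [maxmF]
    apply foldl_id
    intro acc i hi
    rw [if_neg]
    intro hc
    have hmem := (PySem.List.mem_pyRange_one).mp hi
    have : PySem.Int.bxor c ((7:Int) <<< i) ∈ succsB l c :=
      (mem_succsB l c _).mpr ⟨i, hmem.1, hmem.2, hc, rfl⟩
    rw [h] at this
    exact absurd this (List.not_mem_nil)

theorem mx_le_pc (l : Int) : ∀ (n : Nat) (c : Int), pcL c l = n → mx l c ≤ (n : Int) := by
  intro n
  induction n using Nat.strong_induction_on with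
  | _ n ih =>
    intro c hpc
    by_cases hs : succsB l c = []
    · rw [mx_of_no_succs l c hs]; positivity
    · rw [mx_fold l c hs, foldl_max_le_iff]
      refine ⟨by positivity, fun s hsmem => ?_⟩
      have hp := pc_succsB l c s hsmem
      have hn : pcL s l < n := by omega
      have := ih (pcL s l) hn s rfl
      omega

-- ---- layer-level lemmas (the value B folds over a set depends only on membership) ----

def Mlist (l : Int) (cs : List Int) : Int := cs.foldl (fun acc c => max acc (mx l c)) 0

theorem Mlist_nonneg (l : Int) (cs : List Int) : 0 ≤ Mlist l cs :=
  le_foldl_max_init _ _ 0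

-- membership in the accumulated next-layer set
theorem mem_nxt (l : Int) (layer : List Int) (x : Int) :
    x ∈ layer.foldl (fun s c => PySem.Set.update s (succsB l c)) PySem.Set.empty ↔
      ∃ c ∈ layer, x ∈ succsB l c := by
  have gen : ∀ (cs : List Int) (s0 : PySem.Set Int),
      (x ∈ cs.foldl (fun s c => PySem.Set.update s (succsB l c)) s0 ↔
        x ∈ s0 ∨ ∃ c ∈ cs, x ∈ succsB l c) := by
    intro cs
    induction cs with
    | nil => intro s0; simp
    | cons c cs ihc =>
      intro s0
      rw [List.foldl_cons, ihc]
      have hupd : x ∈ PySem.Set.update s0 (succsB l c) ↔ x ∈ s0 ∨ x ∈ succsB l c := by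
        unfold PySem.Set.update
        have gen2 : ∀ (ys : List Int) (t : PySem.Set Int),
            x ∈ ys.foldl PySem.Set.add t ↔ x ∈ t ∨ x ∈ ys := by
          intro ys
          induction ys with
          | nil => intro t; simp
          | cons y ys ihy =>
            intro t
            rw [List.foldl_cons, ihy, PySem.Set.mem_add]
            constructor
            · rintro (⟨h | rfl⟩ | h)
              · exact Or.inl h
              · exact Or.inr (by simp)
              · exact Or.inr (List.mem_cons_of_mem _ h)
            · rintro (h | h)
              · exact Or.inl (Or.inl h)
              · rcases List.mem_cons.mp h with rfl | h
                · exact Or.inl (Or.inr rfl)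
                · exact Or.inr h
        exact gen2 (succsB l c) s0
      rw [hupd]
      constructor
      · rintro ((h | h) | ⟨d, hd, hx⟩)
        · exact Or.inl h
        · exact Or.inr ⟨c, by simp, h⟩
        · exact Or.inr ⟨d, List.mem_cons_of_mem _ hd, hx⟩
      · rintro (h | ⟨d, hd, hx⟩)
        · exact Or.inl (Or.inl h)
        · rcases List.mem_cons.mp hd with rfl | hd
          · exact Or.inl (Or.inr hx)
          · exact Or.inr ⟨d, hd, hx⟩
  rw [gen layer PySem.Set.empty]
  simp [PySem.Set.empty]

-- layer recurrence, empty case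
theorem Mlist_zero_of_no_succs (l : Int) (layer : List Int)
    (h : ∀ c ∈ layer, succsB l c = []) : Mlist l layer = 0 := by
  apply le_antisymm
  · rw [Mlist, foldl_max_le_iff]
    exact ⟨le_rfl, fun c hc => le_of_eq (mx_of_no_succs l c (h c hc))⟩
  · exact Mlist_nonneg l layer

-- layer recurrence, step case: the max over a layer is one more than the max over the next layer
theorem Mlist_step (l : Int) (layer nxt : List Int)
    (hmem : ∀ x, x ∈ nxt ↔ ∃ c ∈ layer, x ∈ succsB l c)
    (hne : nxt ≠ []) : Mlist l layer = 1 + Mlist l nxt := by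
  obtain ⟨s0, hs0⟩ := List.exists_mem_of_ne_nil _ hne
  obtain ⟨c0, hc0, hs0c⟩ := (hmem s0).mp hs0
  apply le_antisymm
  · rw [Mlist, foldl_max_le_iff]
    refine ⟨by have := Mlist_nonneg l nxt; omega, fun c hc => ?_⟩
    by_cases hsc : succsB l c = []
    · rw [mx_of_no_succs l c hsc]
      have := Mlist_nonneg l nxt
      omega
    · rw [mx_fold l c hsc, foldl_max_le_iff]
      refine ⟨by have := Mlist_nonneg l nxt; omega, fun s hsmem => ?_⟩
      have : mx l s ≤ Mlist l nxt :=
        le_foldl_max_mem _ _ _ s ((hmem s).mpr ⟨c, hc, hsmem⟩)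
      omega
  · have h1 : 1 ≤ Mlist l layer := by
      have hc0le : mx l c0 ≤ Mlist l layer := le_foldl_max_mem _ _ _ c0 hc0
      have : 1 + mx l s0 ≤ mx l c0 := by
        rw [mx_fold l c0 (by intro h; rw [h] at hs0c; exact absurd hs0c List.not_mem_nil)]
        exact le_foldl_max_mem _ _ _ s0 hs0c
      have := mx_nonneg l s0
      omega
    have h2 : Mlist l nxt ≤ Mlist l layer - 1 := by
      rw [Mlist, foldl_max_le_iff]
      refine ⟨by omega, fun s hsmem => ?_⟩
      obtain ⟨c, hc, hsc⟩ := (hmem s).mp hsmem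
      have hcle : mx l c ≤ Mlist l layer := le_foldl_max_mem _ _ _ c hc
      have : 1 + mx l s ≤ mx l c := by
        rw [mx_fold l c (by intro h; rw [h] at hsc; exact absurd hsc List.not_mem_nil)]
        exact le_foldl_max_mem _ _ _ s hsc
      omega
    omega

-- ---- B-side main invariant ----

theorem bfsF_eq : ∀ (f : Nat) (l : Int) (layer : PySem.Set Int) (depth : Int),
    (Mlist l layer).toNat < f → bfsF l f layer depth = depth + Mlist l layer := by
  intro f
  induction f with
  | zero => intro l layer depth h; omega
  | succ f ih =>
    intro l layer depth hf
    have hunf : bfsF l (f+1) layer depth =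
        (if (layer.foldl (fun s c => PySem.Set.update s (succsB l c))
              PySem.Set.empty).isEmpty then depth
         else bfsF l f
           (layer.foldl (fun s c => PySem.Set.update s (succsB l c)) PySem.Set.empty)
           (depth + 1)) := rfl
    rw [hunf]
    set nxt : PySem.Set Int :=
      layer.foldl (fun s c => PySem.Set.update s (succsB l c)) PySem.Set.empty with hnxt
    by_cases hemp : nxt.isEmpty
    · rw [if_pos hemp]
      have hnil : nxt = [] := List.isEmpty_iff.mp hemp
      have hnosucc : ∀ c ∈ layer, succsB l c = [] := by
        intro c hc
        cases hsc : succsB l c with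
        | nil => rfl
        | cons a tl =>
          exfalso
          have : a ∈ nxt := (mem_nxt l layer a).mpr ⟨c, hc, by rw [hsc]; simp⟩
          rw [hnil] at this
          exact absurd this List.not_mem_nil
      rw [Mlist_zero_of_no_succs l layer hnosucc]
      ring
    · rw [if_neg hemp]
      have hnil : nxt ≠ [] := fun h => hemp (by rw [h]; rfl)
      have hstep := Mlist_step l layer nxt (mem_nxt l layer) hnil
      have hnn := Mlist_nonneg l nxt
      rw [ih l nxt (depth + 1) (by omega)]
      omega

-- ===== VERDICT (by name: the statement is the Claim_ definition above) =====
theorem dfs_spec : Claim_equal_dfs := by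
  unfold Claim_equal_dfs
  intro b l ones _
  unfold Spec_dfs dfs dfs_alt
  rw [pcF_eq, dfsF_eq_maxmF, maxmF_stab _ _ _ (Nat.le_succ _)]
  have hof : PySem.Set.ofList [b] = [b] := by
    simp [PySem.Set.ofList_eq_foldl, PySem.Set.add]
  have hM : Mlist l [b] = mx l b := by
    rw [Mlist, List.foldl_cons, List.foldl_nil]
    have := mx_nonneg l b
    omega
  have hle := mx_le_pc l (pcL b l) b rfl
  have hnn := mx_nonneg l b
  rw [hof, bfsF_eq (pcL b l + 1) l [b] 0 (by rw [hM]; omega), hM]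
  unfold mx
  ring
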